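-- pv_equiv track=rewrite | github.com/cscience011/Exercise- | logic puzzle.py | solve_puzzle
-- ===== SOURCE A (Python) =====
-- def is_knight(knowledge_base, person):
--     # Helper function to check if a person is a knight based on the knowledge base
--     for speaker, claim in knowledge_base:
--         if speaker == person:
--             if person == 'A':
--                 return claim == "I am a knight or I am a knave."
--             else:
--                 return claim == "I am a knight."
--     return False
--
-- def solve_puzzle(knowledge_base):
--     # List to store the solution(s) found
--     solutions = []
--
--     # Check all possible combinations of knights and knaves for each person
--     for a_knight in [True, False]:
--         for b_knight in [True, False]:
--             for c_knight in [True, False]: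
--                 # Apply the knowledge base to check consistency
--                 if (
--                     is_knight(knowledge_base, 'A') == a_knight and
--                     is_knight(knowledge_base, 'B') == b_knight and
--                     is_knight(knowledge_base, 'C') == c_knight
--                 ):
--                     # Check if there is exactly one knight in the group
--                     if sum([a_knight, b_knight, c_knight]) == 1:
--                         solution = {
--                             'A': 'Knight' if a_knight else 'Knave',
--                             'B': 'Knight' if b_knight else 'Knave',
--                             'C': 'Knight' if c_knight else 'Knave',
--                         }
--                         solutions.append(solution)
--
--     return solutions
-- ===== SOURCE B (Python) =====
-- def solve_puzzle(knowledge_base):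
--     # One pass recording each speaker's FIRST claim, then pick the knights
--     # directly and emit the unique assignment iff it has exactly one knight.
--     first_claim = {}
--     for speaker, claim in knowledge_base:
--         if speaker not in first_claim:
--             first_claim[speaker] = claim
--     expected = {
--         'A': "I am a knight or I am a knave.",
--         'B': "I am a knight.",
--         'C': "I am a knight.",
--     }
--     knights = [p for p in 'ABC' if first_claim.get(p) == expected[p]]
--     if len(knights) == 1:
--         knight = knights[0]
--         return [{p: ('Knight' if p == knight else 'Knave') for p in 'ABC'}]
--     return []
-- ===== Notes on version B (the rewrite author's own statement) =====
-- stated objective: alternative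
-- what changed: Replaces the 8-combination enumerate-and-filter (with 24 is_knight rescans) by one pass building a first-claim dict, a filter selecting the knights against an expected-claim table, and a single exactly-one-knight test that emits the assignment by mapping over the persons.
import Mathlib
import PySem

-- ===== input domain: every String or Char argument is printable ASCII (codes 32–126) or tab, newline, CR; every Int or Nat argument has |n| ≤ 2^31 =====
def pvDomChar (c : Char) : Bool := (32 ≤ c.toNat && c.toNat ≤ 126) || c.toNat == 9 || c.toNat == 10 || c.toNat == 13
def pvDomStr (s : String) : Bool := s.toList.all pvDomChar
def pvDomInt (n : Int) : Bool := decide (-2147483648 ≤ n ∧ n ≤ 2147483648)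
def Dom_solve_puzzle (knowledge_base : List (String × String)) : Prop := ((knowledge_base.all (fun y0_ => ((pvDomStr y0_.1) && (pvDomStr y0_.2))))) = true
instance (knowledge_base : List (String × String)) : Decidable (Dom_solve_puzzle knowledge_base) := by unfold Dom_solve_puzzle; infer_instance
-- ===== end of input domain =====

-- B replaces A's 8-combination enumeration (24 is_knight rescans of the base) by one
-- pass building a first-claim dict, a knights filter and a single exactly-one test.

-- ===== PORT A =====
def is_knight (knowledge_base : List (String × String)) (person : String) : Bool :=
  match knowledge_base with
  | [] => false
  | (speaker, claim) :: rest =>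
    if speaker == person then
      if person == "A" then claim == "I am a knight or I am a knave."
      else claim == "I am a knight."
    else is_knight rest person

def solve_puzzle (knowledge_base : List (String × String)) : List (List (String × String)) :=
  List.foldl (fun sols a_knight =>
    List.foldl (fun sols b_knight =>
      List.foldl (fun sols c_knight =>
        if is_knight knowledge_base "A" == a_knight &&
           is_knight knowledge_base "B" == b_knight &&
           is_knight knowledge_base "C" == c_knight then
          if ((if a_knight then (1:Int) else 0) + (if b_knight then 1 else 0) +
              (if c_knight then 1 else 0)) == 1 then
            sols ++ [[("A", if a_knight then "Knight" else "Knave"),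
                      ("B", if b_knight then "Knight" else "Knave"),
                      ("C", if c_knight then "Knight" else "Knave")]]
          else sols
        else sols) sols [true, false]) sols [true, false]) [] [true, false]

-- ===== PORT B =====
def solve_puzzle_alt (knowledge_base : List (String × String)) : List (List (String × String)) :=
  -- one pass: keep each speaker's FIRST claim ('if speaker not in first_claim')
  let first_claim := knowledge_base.foldl
    (fun d sc => if PySem.Dict.contains d sc.1 then d else PySem.Dict.insert d sc.1 sc.2)
    PySem.Dict.empty
  let expected : PySem.Dict String String := PySem.Dict.ofList
    [("A", "I am a knight or I am a knave."), ("B", "I am a knight."), ("C", "I am a knight.")]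
  -- expected[p] never raises: p ranges over "ABC", all present in the literal dict
  let knights := ["A", "B", "C"].filter
    (fun p => PySem.Dict.get? first_claim p == some (PySem.Dict.getD expected p ""))
  match knights with
  | [knight] =>   -- len(knights) == 1; knight = knights[0]
      [["A", "B", "C"].map (fun p => (p, if p == knight then "Knight" else "Knave"))]
  | _ => []

-- ===== PRECONDITION & SPEC =====
def Spec_solve_puzzle (knowledge_base : List (String × String)) (out : List (List (String × String))) : Prop := out = solve_puzzle_alt knowledge_base
instance (knowledge_base : List (String × String)) (out : List (List (String × String))) : Decidable (Spec_solve_puzzle knowledge_base out) := by unfold Spec_solve_puzzle; infer_instance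

-- ===== CLAIM =====
def Claim_equal_solve_puzzle : Prop := ∀ (knowledge_base : List (String × String)), Dom_solve_puzzle knowledge_base → Spec_solve_puzzle knowledge_base (solve_puzzle knowledge_base)

-- ===== LEMMAS AND PROOFS =====

-- first match of a speaker in the base (proof-side helper)
def lookupFirst (kb : List (String × String)) (p : String) : Option String :=
  match kb with
  | [] => none
  | (s, c) :: rest => if s == p then some c else lookupFirst rest p

-- the setdefault-style fold records exactly the first claim of each speaker
theorem get?_fold_first_claim (kb : List (String × String)) (p : String) :
    ∀ d : PySem.Dict String String,
      PySem.Dict.get? (kb.foldl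
        (fun d sc => if PySem.Dict.contains d sc.1 then d else PySem.Dict.insert d sc.1 sc.2) d) p
      = (PySem.Dict.get? d p).or (lookupFirst kb p) := by
  induction kb with
  | nil => intro d; simp [lookupFirst]
  | cons sc rest ih =>
    intro d
    obtain ⟨s, c⟩ := sc
    simp only [List.foldl_cons, lookupFirst]
    by_cases hc : PySem.Dict.contains d s
    · rw [if_pos hc, ih d]
      by_cases hsp : s = p
      · subst hsp
        rw [PySem.Dict.contains_eq_isSome_get?] at hc
        cases hg : PySem.Dict.get? d s with
        | none => rw [hg] at hc; simp at hc
        | some v => simp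
      · simp [(beq_false_of_ne hsp : (s == p) = false)]
    · rw [if_neg hc, ih]
      by_cases hsp : s = p
      · subst hsp
        rw [PySem.Dict.contains_eq_isSome_get?] at hc
        cases hg : PySem.Dict.get? d s with
        | none => simp [PySem.Dict.get?_insert_self]
        | some v => rw [hg] at hc; simp at hc
      · rw [PySem.Dict.get?_insert_of_ne d c (Ne.symm hsp)]
        simp [(beq_false_of_ne hsp : (s == p) = false)]

-- is_knight is the first-claim lookup compared with the expected claim
theorem is_knight_eq_lookupFirst (kb : List (String × String)) (p : String) :
    is_knight kb p
      = (lookupFirst kb p == some (if p == "A" then "I am a knight or I am a knave."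
                                   else "I am a knight.")) := by
  induction kb with
  | nil => simp [is_knight, lookupFirst]
  | cons sc rest ih =>
    obtain ⟨s, c⟩ := sc
    simp only [is_knight, lookupFirst]
    by_cases hsp : s == p
    · simp [hsp]; split <;> simp
    · simp only [hsp, Bool.false_eq_true, reduceIte, ih]

-- ===== VERDICT =====
theorem solve_puzzle_spec : Claim_equal_solve_puzzle := by
  intro kb _
  unfold Spec_solve_puzzle solve_puzzle solve_puzzle_alt
  simp only [List.filter]
  rw [get?_fold_first_claim kb "A", get?_fold_first_claim kb "B", get?_fold_first_claim kb "C"]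
  simp only [PySem.Dict.get?_empty, Option.none_or]
  have eA : PySem.Dict.getD (PySem.Dict.ofList
      [("A", "I am a knight or I am a knave."), ("B", "I am a knight."), ("C", "I am a knight.")])
      "A" "" = "I am a knight or I am a knave." := by decide
  have eB : PySem.Dict.getD (PySem.Dict.ofList
      [("A", "I am a knight or I am a knave."), ("B", "I am a knight."), ("C", "I am a knight.")])
      "B" "" = "I am a knight." := by decide
  have eC : PySem.Dict.getD (PySem.Dict.ofList
      [("A", "I am a knight or I am a knave."), ("B", "I am a knight."), ("C", "I am a knight.")])
      "C" "" = "I am a knight." := by decide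
  rw [eA, eB, eC]
  have iA : (lookupFirst kb "A" == some "I am a knight or I am a knave.") = is_knight kb "A" := by
    simpa using (is_knight_eq_lookupFirst kb "A").symm
  have iB : (lookupFirst kb "B" == some "I am a knight.") = is_knight kb "B" := by
    simpa using (is_knight_eq_lookupFirst kb "B").symm
  have iC : (lookupFirst kb "C" == some "I am a knight.") = is_knight kb "C" := by
    simpa using (is_knight_eq_lookupFirst kb "C").symm
  rw [iA, iB, iC]
  cases is_knight kb "A" <;> cases is_knight kb "B" <;> cases is_knight kb "C" <;>
    simp [List.foldl]
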